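-- pv_equiv track=rewrite | github.com/haotingtan/academic-portfolio | CS540/HW9/test_game.py | game_value
-- ===== SOURCE A (Python) =====
-- def game_value(state, ai_piece):
--     """ Checks the current board status for a win condition
--
--     Args:
--     state (list of lists): either the current state of the game as saved in
--         this TeekoPlayer object, or a generated successor state.
--
--     Returns:
--         int: 1 if this TeekoPlayer wins, -1 if the opponent wins, 0 if no winner
--     """
--     num_ai_pieces = 0
--     for i in range(5):
--         for j in range(5):
--             if state[i][j] == ai_piece:
--                 num_ai_pieces += 1
--
--     # If illegally placed more than 4 pieces, opponent wins by default
--     if num_ai_pieces > 4: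
--         return -1
--
--     # check horizontal wins
--     for row in state:
--         for i in range(2):
--             if row[i] != ' ' and row[i] == row[i+1] == row[i+2] == row[i+3]:
--                 return 1 if row[i]==ai_piece else -1
--
--     # check vertical wins
--     for col in range(5):
--         for i in range(2):
--             if state[i][col] != ' ' and state[i][col] == state[i+1][col] == state[i+2][col] == state[i+3][col]:
--                 return 1 if state[i][col]==ai_piece else -1
--
--     # Check \ diagonal wins
--     # 1,0; 2,1; 3,2; 4,3;;
--     # 0,0; 1,1; 2,2; 3,3;;
--     # 1,1; 2,2; 3,3; 4,4;;
--     # 0,1; 1,2; 2,3; 3,4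
--     for i in range(2):
--         for j in range(2):
--             cur_st = state[i][j]
--             win = True
--             for pos in range(4):
--                 # (i+pos, j+pos)
--                 if state[i+pos][j+pos] == ' ' or state[i+pos][j+pos] != cur_st:
--                     win = False
--                     break
--             if win:
--                 return 1 if cur_st==ai_piece else -1
--
--     # Check / diagonal wins
--     # 0,3; 1,2; 2,1; 3,0;;
--     # 0,4; 1,3; 2,2; 3,1;;
--     # 1,3; 2,2; 3,1; 4,0;;
--     # 1,4; 2,3; 3,2; 4,1
--     for i in range(2):
--         for j in range(2):
--             cur_st = state[i][4-j]
--             win = True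
--             for pos in range(4):
--                 # (i+pos, 4-j-pos)
--                 if state[i+pos][4-j-pos] == ' ' or state[i+pos][4-j-pos] != cur_st:
--                     win = False
--                     break
--             if win:
--                 return 1 if cur_st==ai_piece else -1
--
--     # Check box wins
--     for i in range(0,4):
--         for j in range(0,4):
--             if state[i][j] != ' ' and state[i][j] == state[i][j+1] == state[i+1][j] == state[i+1][j+1]:
--                 return 1 if state[i][j]==ai_piece else -1
--
--     return 0 # no winner yet
-- ===== SOURCE B (Python) =====
-- def game_value(state, ai_piece):
--     # Geometric approach: collect each player's piece coordinates as a set and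
--     # test for a win by direction vectors / box subset, ai first, then others.
--     if sum(row.count(ai_piece) for row in state) > 4:
--         return -1
--
--     def spots(p):
--         return {(r, c) for r in range(5) for c in range(5) if state[r][c] == p}
--
--     def wins(p):
--         S = spots(p)
--         for r, c in S:
--             if any(all((r + k * dr, c + k * dc) in S for k in (1, 2, 3))
--                    for dr, dc in ((0, 1), (1, 0), (1, 1), (1, -1))) \
--                or {(r, c + 1), (r + 1, c), (r + 1, c + 1)} <= S:
--                 return True
--         return False
--
--     if ai_piece != ' ' and wins(ai_piece):
--         return 1
--     others = {state[r][c] for r in range(5) for c in range(5)} - {' ', ai_piece}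
--     if any(wins(p) for p in others):
--         return -1
--     return 0
-- ===== Notes on version B (the rewrite author's own statement) =====
-- stated objective: alternative
-- what changed: Replaces A's five hand-written coordinate scan phases by a geometric algorithm: each player's piece coordinates are collected into a set once, and a win is detected by direction vectors (and a 2x2 box subset test) over that set, querying the AI player first and then the other players; …
import Mathlib
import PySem

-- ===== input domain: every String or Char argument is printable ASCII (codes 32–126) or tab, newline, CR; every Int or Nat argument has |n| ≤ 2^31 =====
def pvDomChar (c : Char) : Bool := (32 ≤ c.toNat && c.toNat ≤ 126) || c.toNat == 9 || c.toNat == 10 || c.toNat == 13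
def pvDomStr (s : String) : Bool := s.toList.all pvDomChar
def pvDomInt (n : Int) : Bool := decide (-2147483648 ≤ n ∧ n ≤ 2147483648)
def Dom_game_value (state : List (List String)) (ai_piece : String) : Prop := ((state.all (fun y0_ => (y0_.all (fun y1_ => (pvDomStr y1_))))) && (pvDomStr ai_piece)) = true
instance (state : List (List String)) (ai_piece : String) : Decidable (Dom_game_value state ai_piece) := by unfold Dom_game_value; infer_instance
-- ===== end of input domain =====

-- B replaces A's five hand-written scan phases by a geometric algorithm over each player's
-- coordinate set (direction vectors + 2x2 box subset test), ai queried first (objective: alternative).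

-- state[i][j]; exact for the in-range indices used under Pre_ (Python raises outside, excluded by Pre_)
def pvCell (state : List (List String)) (i j : Nat) : String :=
  (state.getD i []).getD j ""

-- ===== PORT A =====
def pvCountA (state : List (List String)) (ai : String) : Int :=
  (List.range 5).foldl (fun acc i =>
    (List.range 5).foldl (fun acc2 j =>
      if pvCell state i j == ai then acc2 + 1 else acc2) acc) 0

def pvHorizInner (row : List String) (ai : String) : List Nat → Option Int
  | [] => none
  | i :: is =>
    if row.getD i "" != " " && row.getD i "" == row.getD (i+1) "" &&
       row.getD (i+1) "" == row.getD (i+2) "" && row.getD (i+2) "" == row.getD (i+3) "" then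
      some (if row.getD i "" == ai then 1 else -1)
    else pvHorizInner row ai is

def pvHoriz (ai : String) : List (List String) → Option Int
  | [] => none
  | row :: rest =>
    (pvHorizInner row ai (List.range 2)).or (pvHoriz ai rest)

def pvVertInner (state : List (List String)) (ai : String) (col : Nat) : List Nat → Option Int
  | [] => none
  | i :: is =>
    if pvCell state i col != " " && pvCell state i col == pvCell state (i+1) col &&
       pvCell state (i+1) col == pvCell state (i+2) col && pvCell state (i+2) col == pvCell state (i+3) col then
      some (if pvCell state i col == ai then 1 else -1)
    else pvVertInner state ai col is

def pvVert (state : List (List String)) (ai : String) : List Nat → Option Int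
  | [] => none
  | col :: cs =>
    (pvVertInner state ai col (List.range 2)).or (pvVert state ai cs)

def pvDiag1Win (state : List (List String)) (cur : String) (i j : Nat) : List Nat → Bool
  | [] => true
  | pos :: ps =>
    if pvCell state (i+pos) (j+pos) == " " || pvCell state (i+pos) (j+pos) != cur then false
    else pvDiag1Win state cur i j ps

def pvDiag1J (state : List (List String)) (ai : String) (i : Nat) : List Nat → Option Int
  | [] => none
  | j :: js =>
    if pvDiag1Win state (pvCell state i j) i j (List.range 4) then
      some (if pvCell state i j == ai then 1 else -1)
    else pvDiag1J state ai i js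

def pvDiag1 (state : List (List String)) (ai : String) : List Nat → Option Int
  | [] => none
  | i :: is =>
    (pvDiag1J state ai i (List.range 2)).or (pvDiag1 state ai is)

def pvDiag2Win (state : List (List String)) (cur : String) (i j : Nat) : List Nat → Bool
  | [] => true
  | pos :: ps =>
    if pvCell state (i+pos) (4-j-pos) == " " || pvCell state (i+pos) (4-j-pos) != cur then false
    else pvDiag2Win state cur i j ps

def pvDiag2J (state : List (List String)) (ai : String) (i : Nat) : List Nat → Option Int
  | [] => none
  | j :: js =>
    if pvDiag2Win state (pvCell state i (4-j)) i j (List.range 4) then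
      some (if pvCell state i (4-j) == ai then 1 else -1)
    else pvDiag2J state ai i js

def pvDiag2 (state : List (List String)) (ai : String) : List Nat → Option Int
  | [] => none
  | i :: is =>
    (pvDiag2J state ai i (List.range 2)).or (pvDiag2 state ai is)

def pvBoxJ (state : List (List String)) (ai : String) (i : Nat) : List Nat → Option Int
  | [] => none
  | j :: js =>
    if pvCell state i j != " " && pvCell state i j == pvCell state i (j+1) &&
       pvCell state i (j+1) == pvCell state (i+1) j && pvCell state (i+1) j == pvCell state (i+1) (j+1) then
      some (if pvCell state i j == ai then 1 else -1)
    else pvBoxJ state ai i js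

def pvBox (state : List (List String)) (ai : String) : List Nat → Option Int
  | [] => none
  | i :: is =>
    (pvBoxJ state ai i (List.range 4)).or (pvBox state ai is)

def game_value (state : List (List String)) (ai_piece : String) : Int :=
  if pvCountA state ai_piece > 4 then -1
  else ((pvHoriz ai_piece state).or ((pvVert state ai_piece (List.range 5)).or
    ((pvDiag1 state ai_piece (List.range 2)).or ((pvDiag2 state ai_piece (List.range 2)).or
      (pvBox state ai_piece (List.range 4)))))).getD 0

-- ===== PORT B =====
-- {(r, c) for r in range(5) for c in range(5) if state[r][c] == p}  (coordinates as Python ints)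
def pvSpots (state : List (List String)) (p : String) : PySem.Set (Int × Int) :=
  PySem.Set.ofList ((List.range 5).flatMap (fun r => (List.range 5).filterMap (fun c =>
    if pvCell state r c == p then some ((r : Int), (c : Int)) else none)))

def pvDirs : List (Int × Int) := [(0,1),(1,0),(1,1),(1,-1)]

def pvWinsB (state : List (List String)) (p : String) : Bool :=
  let S := pvSpots state p
  S.any (fun rc =>
    (pvDirs.any (fun d => ([1,2,3] : List Int).all (fun k =>
        PySem.Set.contains S (rc.1 + k * d.1, rc.2 + k * d.2))))
    || PySem.Set.issubset
        (PySem.Set.ofList [(rc.1, rc.2 + 1), (rc.1 + 1, rc.2), (rc.1 + 1, rc.2 + 1)]) S)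

-- {state[r][c] for r in range(5) for c in range(5)} - {' ', ai_piece}
def pvOthers (state : List (List String)) (ai : String) : PySem.Set String :=
  PySem.Set.diff
    (PySem.Set.ofList ((List.range 5).flatMap (fun r => (List.range 5).map (fun c => pvCell state r c))))
    (PySem.Set.ofList [" ", ai])

def game_value_alt (state : List (List String)) (ai_piece : String) : Int :=
  if (state.map (fun row => (row.count ai_piece : Int))).sum > 4 then -1
  else if ai_piece != " " && pvWinsB state ai_piece then 1
  else if (pvOthers state ai_piece).any (fun p => pvWinsB state p) then -1
  else 0

-- ===== PRECONDITION & SPEC =====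
-- The 44 winning coordinate groups of the 5x5 Teeko board, in A's scan order (used by Pre_ and the proofs only)
def pvPatterns : List (List (Nat × Nat)) :=
  ((List.range 5).flatMap fun r => (List.range 2).map fun c => (List.range 4).map fun k => (r, c + k))
  ++ ((List.range 5).flatMap fun c => (List.range 2).map fun r => (List.range 4).map fun k => (r + k, c))
  ++ ((List.range 2).flatMap fun i => (List.range 2).map fun j => (List.range 4).map fun k => (i + k, j + k))
  ++ ((List.range 2).flatMap fun i => (List.range 2).map fun j => (List.range 4).map fun k => (i + k, 4 - j - k))
  ++ ((List.range 4).flatMap fun i => (List.range 4).map fun j => [(i, j), (i, j + 1), (i + 1, j), (i + 1, j + 1)])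

def pvCompleted (state : List (List String)) (g : List (Nat × Nat)) (q : String) : Bool :=
  g.all (fun rc => pvCell state rc.1 rc.2 == q)

def pvHasWin (state : List (List String)) (q : String) : Bool :=
  q != " " && pvPatterns.any (fun g => pvCompleted state g q)

def pvOtherWin (state : List (List String)) (ai : String) : Bool :=
  (List.range 5).any (fun r => (List.range 5).any (fun c =>
    (pvCell state r c != ai) && pvHasWin state (pvCell state r c)))

-- Pre_ restricts to exactly-5x5 boards (A raises IndexError on smaller boards; on larger boards,
-- outside the game's domain, the two scans defensibly cover different extra cells) and excludes
-- boards where both the AI and another player have a completed winning pattern — there A's verdict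
-- is an accident of its scan order (first-pattern-found) and neither answer is specified.
def Pre_game_value (state : List (List String)) (ai_piece : String) : Prop :=
  state.length = 5 ∧ state.all (fun r => r.length == 5) = true ∧
  ¬(pvHasWin state ai_piece = true ∧ pvOtherWin state ai_piece = true)
instance (state : List (List String)) (ai_piece : String) : Decidable (Pre_game_value state ai_piece) := by unfold Pre_game_value; infer_instance

def Spec_game_value (state : List (List String)) (ai_piece : String) (out : Int) : Prop := out = game_value_alt state ai_piece
instance (state : List (List String)) (ai_piece : String) (out : Int) : Decidable (Spec_game_value state ai_piece out) := by unfold Spec_game_value; infer_instance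

def pvWitness_game_value : List (List String) × String :=
  ([["b", "b", "b", "b", " "], [" ", "r", " ", " ", " "], [" ", "r", " ", " ", " "],
    [" ", " ", " ", " ", " "], [" ", " ", " ", " ", " "]], "b")

-- ===== CLAIM (what is proved, stated in full; the proofs are below) =====
def Claim_equal_game_value : Prop := ∀ (state : List (List String)) (ai_piece : String), Dom_game_value state ai_piece → Pre_game_value state ai_piece → Spec_game_value state ai_piece (game_value state ai_piece)

-- ===== LEMMAS AND PROOFS =====

-- T: A's result re-expressed as one ordered scan over pvPatterns (proof-side bridge)
def pvScanT (state : List (List String)) (ai : String) : List (List (Nat × Nat)) → Int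
  | [] => 0
  | g :: rest =>
    let first := pvCell state (g.headD (0, 0)).1 (g.headD (0, 0)).2
    if first != " " && pvCompleted state g first then
      (if first == ai then 1 else -1)
    else pvScanT state ai rest

theorem pvOrIte {α : Type} (c : Prop) [Decidable c] (v : α) (o rest : Option α) :
    ((if c then some v else o).or rest) = if c then some v else (o.or rest) := by
  split <;> rfl

theorem pvGetDIte {α : Type} (c : Prop) [Decidable c] (v : α) (o : Option α) (d : α) :
    (if c then some v else o).getD d = if c then v else o.getD d := by
  split <;> rfl

theorem pvChainIff (x p q r : String) :
    (((¬x = " " ∧ x = p) ∧ p = q) ∧ q = r) ↔ (¬x = " " ∧ p = x ∧ q = x ∧ r = x) := by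
  constructor
  · rintro ⟨⟨⟨h1, h2⟩, h3⟩, h4⟩; subst h2; subst h3; subst h4; simp [h1]
  · rintro ⟨h1, h2, h3, h4⟩; subst h2; subst h3; subst h4; simp [h1]

theorem pvDiagIff (x p q r : String) :
    (¬x = " " ∧ (¬p = " " ∧ p = x) ∧ (¬q = " " ∧ q = x) ∧ ¬r = " " ∧ r = x) ↔
      (¬x = " " ∧ p = x ∧ q = x ∧ r = x) := by
  constructor
  · rintro ⟨h1, ⟨_, h2⟩, ⟨_, h3⟩, _, h4⟩; exact ⟨h1, h2, h3, h4⟩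
  · rintro ⟨h1, h2, h3, h4⟩; subst h2; subst h3; subst h4; exact ⟨h1, ⟨h1, rfl⟩, ⟨h1, rfl⟩, h1, rfl⟩

-- A equals the T scan on 5x5 boards
theorem pvAT (state : List (List String)) (ai : String)
    (h5 : state.length = 5) (hrows : state.all (fun r => r.length == 5) = true) :
    game_value state ai = if pvCountA state ai > 4 then -1 else pvScanT state ai pvPatterns := by
  rcases state with _ | ⟨r0, _ | ⟨r1, _ | ⟨r2, _ | ⟨r3, _ | ⟨r4, _ | ⟨r5, t⟩⟩⟩⟩⟩⟩ <;> simp_all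
  rcases r0 with _ | ⟨a0, _ | ⟨a1, _ | ⟨a2, _ | ⟨a3, _ | ⟨a4, _ | ⟨a5, t⟩⟩⟩⟩⟩⟩ <;> simp_all
  rcases r1 with _ | ⟨b0, _ | ⟨b1, _ | ⟨b2, _ | ⟨b3, _ | ⟨b4, _ | ⟨b5, t⟩⟩⟩⟩⟩⟩ <;> simp_all
  rcases r2 with _ | ⟨c0, _ | ⟨c1, _ | ⟨c2, _ | ⟨c3, _ | ⟨c4, _ | ⟨c5, t⟩⟩⟩⟩⟩⟩ <;> simp_all
  rcases r3 with _ | ⟨d0, _ | ⟨d1, _ | ⟨d2, _ | ⟨d3, _ | ⟨d4, _ | ⟨d5, t⟩⟩⟩⟩⟩⟩ <;> simp_all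
  rcases r4 with _ | ⟨e0, _ | ⟨e1, _ | ⟨e2, _ | ⟨e3, _ | ⟨e4, _ | ⟨e5, t⟩⟩⟩⟩⟩⟩ <;> simp_all
  simp only [game_value]
  simp [pvPatterns, pvHoriz, pvHorizInner, pvVert, pvVertInner, pvDiag1, pvDiag1J, pvDiag1Win,
    pvDiag2, pvDiag2J, pvDiag2Win, pvBox, pvBoxJ, pvScanT, pvCompleted, List.range_succ, pvCell,
    pvChainIff, pvDiagIff, pvOrIte, pvGetDIte]

-- count equality on 5x5 boards
theorem pvCount_eq (state : List (List String)) (ai : String)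
    (h5 : state.length = 5) (hrows : state.all (fun r => r.length == 5) = true) :
    pvCountA state ai = (state.map (fun row => (row.count ai : Int))).sum := by
  rcases state with _ | ⟨r0, _ | ⟨r1, _ | ⟨r2, _ | ⟨r3, _ | ⟨r4, _ | ⟨r5, t⟩⟩⟩⟩⟩⟩ <;> simp_all
  rcases r0 with _ | ⟨a0, _ | ⟨a1, _ | ⟨a2, _ | ⟨a3, _ | ⟨a4, _ | ⟨a5, t⟩⟩⟩⟩⟩⟩ <;> simp_all
  rcases r1 with _ | ⟨b0, _ | ⟨b1, _ | ⟨b2, _ | ⟨b3, _ | ⟨b4, _ | ⟨b5, t⟩⟩⟩⟩⟩⟩ <;> simp_all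
  rcases r2 with _ | ⟨c0, _ | ⟨c1, _ | ⟨c2, _ | ⟨c3, _ | ⟨c4, _ | ⟨c5, t⟩⟩⟩⟩⟩⟩ <;> simp_all
  rcases r3 with _ | ⟨d0, _ | ⟨d1, _ | ⟨d2, _ | ⟨d3, _ | ⟨d4, _ | ⟨d5, t⟩⟩⟩⟩⟩⟩ <;> simp_all
  rcases r4 with _ | ⟨e0, _ | ⟨e1, _ | ⟨e2, _ | ⟨e3, _ | ⟨e4, _ | ⟨e5, t⟩⟩⟩⟩⟩⟩ <;> simp_all
  simp only [pvCountA, PySem.List.foldl_if_add_one, PySem.List.foldl_add]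
  simp [List.range_succ, List.count_cons, List.countP_cons, pvCell]

-- first cell of a group, as scanned by T
def pvFirst (state : List (List String)) (g : List (Nat × Nat)) : String :=
  pvCell state (g.headD (0, 0)).1 (g.headD (0, 0)).2

def pvGood (state : List (List String)) (g : List (Nat × Nat)) : Bool :=
  (pvFirst state g != " ") && pvCompleted state g (pvFirst state g)

theorem pvPatterns_head : ∀ g ∈ pvPatterns, g.headD (0, 0) ∈ g := by decide

theorem pvPatterns_bounds : ∀ g ∈ pvPatterns, ∀ rc ∈ g, rc.1 < 5 ∧ rc.2 < 5 := by decide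

theorem pvMapRange4 (f : Nat → Nat × Nat) : (List.range 4).map f = [f 0, f 1, f 2, f 3] := by
  simp [List.range_succ]

theorem pvSpots_mem (state : List (List String)) (q : String) (x : Int × Int) :
    x ∈ pvSpots state q ↔
      ∃ r c : Nat, r < 5 ∧ c < 5 ∧ x = ((r : Int), (c : Int)) ∧ pvCell state r c = q := by
  simp only [pvSpots, PySem.Set.mem_ofList, List.mem_flatMap, List.mem_filterMap, List.mem_range]
  constructor
  · rintro ⟨r, hr, c, hc, hx⟩
    split at hx
    · rename_i h
      exact ⟨r, c, hr, hc, (Option.some.inj hx).symm, by simpa using h⟩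
    · simp at hx
  · rintro ⟨r, c, hr, hc, rfl, hcell⟩
    exact ⟨r, hr, c, hc, by simp [hcell]⟩

theorem pvPatterns_mem (g : List (Nat × Nat)) :
    g ∈ pvPatterns ↔
      (∃ r < 5, ∃ c < 2, g = [(r,c),(r,c+1),(r,c+2),(r,c+3)]) ∨
      (∃ c < 5, ∃ r < 2, g = [(r,c),(r+1,c),(r+2,c),(r+3,c)]) ∨
      (∃ i < 2, ∃ j < 2, g = [(i,j),(i+1,j+1),(i+2,j+2),(i+3,j+3)]) ∨
      (∃ i < 2, ∃ j < 2, g = [(i,4-j),(i+1,4-j-1),(i+2,4-j-2),(i+3,4-j-3)]) ∨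
      (∃ i < 4, ∃ j < 4, g = [(i,j),(i,j+1),(i+1,j),(i+1,j+1)]) := by
  simp only [pvPatterns, List.mem_append, List.mem_flatMap, List.mem_map, List.mem_range,
    pvMapRange4]
  norm_num [eq_comm]
  simp only [or_assoc]

-- bounds and cell value carried by a spots member
theorem pvSpots_cell (state : List (List String)) (q : String) {x : Int × Int}
    (h : x ∈ pvSpots state q) :
    0 ≤ x.1 ∧ x.1 < 5 ∧ 0 ≤ x.2 ∧ x.2 < 5 ∧ pvCell state x.1.toNat x.2.toNat = q := by
  obtain ⟨r, c, hr, hc, rfl, hcell⟩ := (pvSpots_mem state q x).mp h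
  refine ⟨by omega, by omega, by omega, by omega, by simpa using hcell⟩

-- a direction hit witnesses pvWinsB
theorem pvWinsB_of (state : List (List String)) (q : String) (r c : Nat) (dr dc : Int)
    (hd : (dr, dc) ∈ pvDirs) (hr : r < 5) (hc : c < 5) (h0 : pvCell state r c = q)
    (hk : ∀ k : Int, k ∈ ([1,2,3] : List Int) →
      ((r : Int) + k * dr, (c : Int) + k * dc) ∈ pvSpots state q) :
    pvWinsB state q = true := by
  unfold pvWinsB
  refine List.any_eq_true.mpr ⟨((r : Int), (c : Int)),
    (pvSpots_mem state q _).mpr ⟨r, c, hr, hc, rfl, h0⟩, ?_⟩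
  rw [Bool.or_eq_true]
  refine Or.inl (List.any_eq_true.mpr ⟨(dr, dc), hd, ?_⟩)
  refine List.all_eq_true.mpr ?_
  intro k hkm
  exact (PySem.Set.contains_iff _ _).mpr (hk k hkm)

-- a box hit witnesses pvWinsB
theorem pvWinsB_box (state : List (List String)) (q : String) (r c : Nat)
    (hr : r < 5) (hc : c < 5) (h0 : pvCell state r c = q)
    (h1 : ((r : Int), (c : Int) + 1) ∈ pvSpots state q)
    (h2 : ((r : Int) + 1, (c : Int)) ∈ pvSpots state q)
    (h3 : ((r : Int) + 1, (c : Int) + 1) ∈ pvSpots state q) :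
    pvWinsB state q = true := by
  unfold pvWinsB
  refine List.any_eq_true.mpr ⟨((r : Int), (c : Int)),
    (pvSpots_mem state q _).mpr ⟨r, c, hr, hc, rfl, h0⟩, ?_⟩
  rw [Bool.or_eq_true]
  refine Or.inr ((PySem.Set.issubset_iff _ _).mpr ?_)
  intro x hx
  simp only [PySem.Set.mem_ofList, List.mem_cons, List.not_mem_nil, or_false] at hx
  rcases hx with rfl | rfl | rfl
  · exact h1
  · exact h2
  · exact h3

-- B's geometric win test finds exactly the completed pvPatterns groups
theorem pvWinsB_iff (state : List (List String)) (q : String) :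
    pvWinsB state q = true ↔ ∃ g ∈ pvPatterns, pvCompleted state g q = true := by
  constructor
  · intro h
    unfold pvWinsB at h
    obtain ⟨x, hx, hfx⟩ := List.any_eq_true.mp h
    obtain ⟨r, c, hr, hc, rfl, hcell⟩ := (pvSpots_mem state q x).mp hx
    rw [Bool.or_eq_true] at hfx
    rcases hfx with hdir | hbox
    · obtain ⟨d, hd, hall⟩ := List.any_eq_true.mp hdir
      have hk := fun (k : Int) (hkm : k ∈ ([1,2,3] : List Int)) =>
        (PySem.Set.contains_iff _ _).mp (List.all_eq_true.mp hall k hkm)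
      simp only [pvDirs, List.mem_cons, List.not_mem_nil, or_false] at hd
      rcases hd with rfl | rfl | rfl | rfl
      · -- direction (0, 1): horizontal
        have m1 := pvSpots_cell state q (hk 1 (by simp))
        have m2 := pvSpots_cell state q (hk 2 (by simp))
        have m3 := pvSpots_cell state q (hk 3 (by simp))
        refine ⟨[(r,c),(r,c+1),(r,c+2),(r,c+3)],
          (pvPatterns_mem _).mpr (Or.inl ⟨r, hr, c, by omega, rfl⟩), ?_⟩
        have f1 : pvCell state r (c+1) = q := by convert m1.2.2.2.2 using 2 <;> omega
        have f2 : pvCell state r (c+2) = q := by convert m2.2.2.2.2 using 2 <;> omega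
        have f3 : pvCell state r (c+3) = q := by convert m3.2.2.2.2 using 2 <;> omega
        simp [pvCompleted, hcell, f1, f2, f3]
      · -- direction (1, 0): vertical
        have m1 := pvSpots_cell state q (hk 1 (by simp))
        have m2 := pvSpots_cell state q (hk 2 (by simp))
        have m3 := pvSpots_cell state q (hk 3 (by simp))
        refine ⟨[(r,c),(r+1,c),(r+2,c),(r+3,c)],
          (pvPatterns_mem _).mpr (Or.inr (Or.inl ⟨c, hc, r, by omega, rfl⟩)), ?_⟩
        have f1 : pvCell state (r+1) c = q := by convert m1.2.2.2.2 using 2 <;> omega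
        have f2 : pvCell state (r+2) c = q := by convert m2.2.2.2.2 using 2 <;> omega
        have f3 : pvCell state (r+3) c = q := by convert m3.2.2.2.2 using 2 <;> omega
        simp [pvCompleted, hcell, f1, f2, f3]
      · -- direction (1, 1): \ diagonal
        have m1 := pvSpots_cell state q (hk 1 (by simp))
        have m2 := pvSpots_cell state q (hk 2 (by simp))
        have m3 := pvSpots_cell state q (hk 3 (by simp))
        refine ⟨[(r,c),(r+1,c+1),(r+2,c+2),(r+3,c+3)],
          (pvPatterns_mem _).mpr (Or.inr (Or.inr (Or.inl ⟨r, by omega, c, by omega, rfl⟩))), ?_⟩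
        have f1 : pvCell state (r+1) (c+1) = q := by convert m1.2.2.2.2 using 2 <;> omega
        have f2 : pvCell state (r+2) (c+2) = q := by convert m2.2.2.2.2 using 2 <;> omega
        have f3 : pvCell state (r+3) (c+3) = q := by convert m3.2.2.2.2 using 2 <;> omega
        simp [pvCompleted, hcell, f1, f2, f3]
      · -- direction (1, -1): / diagonal
        have m1 := pvSpots_cell state q (hk 1 (by simp))
        have m2 := pvSpots_cell state q (hk 2 (by simp))
        have m3 := pvSpots_cell state q (hk 3 (by simp))
        have hc3 : 3 ≤ c := by
          have := m3.2.2.1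
          simp only at this
          omega
        refine ⟨[(r,4-(4-c)),(r+1,4-(4-c)-1),(r+2,4-(4-c)-2),(r+3,4-(4-c)-3)],
          (pvPatterns_mem _).mpr (Or.inr (Or.inr (Or.inr (Or.inl ⟨r, by omega, 4-c, by omega, rfl⟩)))), ?_⟩
        have f1 : pvCell state (r+1) (4-(4-c)-1) = q := by convert m1.2.2.2.2 using 2 <;> omega
        have f2 : pvCell state (r+2) (4-(4-c)-2) = q := by convert m2.2.2.2.2 using 2 <;> omega
        have f3 : pvCell state (r+3) (4-(4-c)-3) = q := by convert m3.2.2.2.2 using 2 <;> omega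
        have f0 : pvCell state r (4-(4-c)) = q := by convert hcell using 2 <;> omega
        simp [pvCompleted, f0, f1, f2, f3]
    · -- box subset
      have hsub := (PySem.Set.issubset_iff _ _).mp hbox
      have m1 := pvSpots_cell state q (hsub ((r : Int), (c : Int) + 1) (by simp [PySem.Set.mem_ofList]))
      have m2 := pvSpots_cell state q (hsub ((r : Int) + 1, (c : Int)) (by simp [PySem.Set.mem_ofList]))
      have m3 := pvSpots_cell state q (hsub ((r : Int) + 1, (c : Int) + 1) (by simp [PySem.Set.mem_ofList]))
      have hb1 : ((r : Int) + 1) < 5 := by have := m3.2.1; simp only at this; omega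
      have hb2 : ((c : Int) + 1) < 5 := by have := m3.2.2.2.1; simp only at this; omega
      refine ⟨[(r,c),(r,c+1),(r+1,c),(r+1,c+1)],
        (pvPatterns_mem _).mpr (Or.inr (Or.inr (Or.inr (Or.inr ⟨r, by omega, c, by omega, rfl⟩)))), ?_⟩
      have f1 : pvCell state r (c+1) = q := by convert m1.2.2.2.2 using 2 <;> omega
      have f2 : pvCell state (r+1) c = q := by convert m2.2.2.2.2 using 2 <;> omega
      have f3 : pvCell state (r+1) (c+1) = q := by convert m3.2.2.2.2 using 2 <;> omega
      simp [pvCompleted, hcell, f1, f2, f3]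
  · intro h
    obtain ⟨g, hg, hcomp⟩ := h
    rcases (pvPatterns_mem g).mp hg with ⟨r, hr, c, hc, rfl⟩ | ⟨c, hc, r, hr, rfl⟩ |
      ⟨i, hi, j, hj, rfl⟩ | ⟨i, hi, j, hj, rfl⟩ | ⟨i, hi, j, hj, rfl⟩
    all_goals simp only [pvCompleted, List.all_cons, List.all_nil, Bool.and_eq_true,
      beq_iff_eq, and_true] at hcomp
    · -- horizontal: direction (0, 1)
      obtain ⟨f0, f1, f2, f3⟩ := hcomp
      refine pvWinsB_of state q r c 0 1 (by simp [pvDirs]) hr (by omega) f0 ?_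
      intro k hkm
      simp only [List.mem_cons, List.not_mem_nil, or_false] at hkm
      rcases hkm with rfl | rfl | rfl
      · exact (pvSpots_mem state q _).mpr ⟨r, c+1, by omega, by omega, by simp [Prod.ext_iff] <;> omega, f1⟩
      · exact (pvSpots_mem state q _).mpr ⟨r, c+2, by omega, by omega, by simp [Prod.ext_iff] <;> omega, f2⟩
      · exact (pvSpots_mem state q _).mpr ⟨r, c+3, by omega, by omega, by simp [Prod.ext_iff] <;> omega, f3⟩
    · -- vertical: direction (1, 0)
      obtain ⟨f0, f1, f2, f3⟩ := hcomp
      refine pvWinsB_of state q r c 1 0 (by simp [pvDirs]) (by omega) hc f0 ?_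
      intro k hkm
      simp only [List.mem_cons, List.not_mem_nil, or_false] at hkm
      rcases hkm with rfl | rfl | rfl
      · exact (pvSpots_mem state q _).mpr ⟨r+1, c, by omega, by omega, by simp [Prod.ext_iff] <;> omega, f1⟩
      · exact (pvSpots_mem state q _).mpr ⟨r+2, c, by omega, by omega, by simp [Prod.ext_iff] <;> omega, f2⟩
      · exact (pvSpots_mem state q _).mpr ⟨r+3, c, by omega, by omega, by simp [Prod.ext_iff] <;> omega, f3⟩
    · -- \ diagonal: direction (1, 1)
      obtain ⟨f0, f1, f2, f3⟩ := hcomp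
      refine pvWinsB_of state q i j 1 1 (by simp [pvDirs]) (by omega) (by omega) f0 ?_
      intro k hkm
      simp only [List.mem_cons, List.not_mem_nil, or_false] at hkm
      rcases hkm with rfl | rfl | rfl
      · exact (pvSpots_mem state q _).mpr ⟨i+1, j+1, by omega, by omega, by simp [Prod.ext_iff] <;> omega, f1⟩
      · exact (pvSpots_mem state q _).mpr ⟨i+2, j+2, by omega, by omega, by simp [Prod.ext_iff] <;> omega, f2⟩
      · exact (pvSpots_mem state q _).mpr ⟨i+3, j+3, by omega, by omega, by simp [Prod.ext_iff] <;> omega, f3⟩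
    · -- / diagonal: direction (1, -1)
      obtain ⟨f0, f1, f2, f3⟩ := hcomp
      refine pvWinsB_of state q i (4-j) 1 (-1) (by simp [pvDirs]) (by omega) (by omega) f0 ?_
      intro k hkm
      simp only [List.mem_cons, List.not_mem_nil, or_false] at hkm
      rcases hkm with rfl | rfl | rfl
      · exact (pvSpots_mem state q _).mpr ⟨i+1, 4-j-1, by omega, by omega, by simp [Prod.ext_iff] <;> omega, f1⟩
      · exact (pvSpots_mem state q _).mpr ⟨i+2, 4-j-2, by omega, by omega, by simp [Prod.ext_iff] <;> omega, f2⟩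
      · exact (pvSpots_mem state q _).mpr ⟨i+3, 4-j-3, by omega, by omega, by simp [Prod.ext_iff] <;> omega, f3⟩
    · -- box
      obtain ⟨f0, f1, f2, f3⟩ := hcomp
      refine pvWinsB_box state q i j (by omega) (by omega) f0
        ((pvSpots_mem state q _).mpr ⟨i, j+1, by omega, by omega, by simp [Prod.ext_iff] <;> omega, f1⟩)
        ((pvSpots_mem state q _).mpr ⟨i+1, j, by omega, by omega, by simp [Prod.ext_iff] <;> omega, f2⟩)
        ((pvSpots_mem state q _).mpr ⟨i+1, j+1, by omega, by omega, by simp [Prod.ext_iff] <;> omega, f3⟩)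

theorem pvScanT_zero (state : List (List String)) (ai : String) (L : List (List (Nat × Nat)))
    (h : ∀ g ∈ L, pvGood state g = false) : pvScanT state ai L = 0 := by
  induction L with
  | nil => rfl
  | cons g rest ih =>
    have hg := h g (by simp)
    simp only [pvGood, pvFirst] at hg
    simp only [pvScanT, hg]
    exact ih (fun g' hg' => h g' (by simp [hg']))

theorem pvScanT_one (state : List (List String)) (ai : String) (L : List (List (Nat × Nat)))
    (h1 : ∃ g ∈ L, pvGood state g = true)
    (h2 : ∀ g ∈ L, pvGood state g = true → pvFirst state g = ai) :
    pvScanT state ai L = 1 := by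
  induction L with
  | nil => simp at h1
  | cons g rest ih =>
    by_cases hg : pvGood state g = true
    · have := h2 g (by simp) hg
      simp only [pvGood, pvFirst] at hg
      simp only [pvScanT, hg]
      simp only [pvFirst, List.headD_eq_head?_getD] at this
      simp [this]
    · simp only [pvGood, pvFirst, Bool.not_eq_true] at hg
      simp only [pvScanT, hg]
      rcases h1 with ⟨g', hg', hgood⟩
      rcases List.mem_cons.mp hg' with rfl | hmem
      · exact absurd hgood (by simp only [pvGood, pvFirst, hg]; simp)
      · exact ih ⟨g', hmem, hgood⟩ (fun g'' hm hgd => h2 g'' (by simp [hm]) hgd)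

theorem pvScanT_neg (state : List (List String)) (ai : String) (L : List (List (Nat × Nat)))
    (h1 : ∃ g ∈ L, pvGood state g = true)
    (h2 : ∀ g ∈ L, pvGood state g = true → pvFirst state g ≠ ai) :
    pvScanT state ai L = -1 := by
  induction L with
  | nil => simp at h1
  | cons g rest ih =>
    by_cases hg : pvGood state g = true
    · have := h2 g (by simp) hg
      simp only [pvGood, pvFirst] at hg
      simp only [pvScanT, hg]
      simp only [pvFirst, List.headD_eq_head?_getD] at this
      simp [this]
    · simp only [pvGood, pvFirst, Bool.not_eq_true] at hg
      simp only [pvScanT, hg]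
      rcases h1 with ⟨g', hg', hgood⟩
      rcases List.mem_cons.mp hg' with rfl | hmem
      · exact absurd hgood (by simp only [pvGood, pvFirst, hg]; simp)
      · exact ih ⟨g', hmem, hgood⟩ (fun g'' hm hgd => h2 g'' (by simp [hm]) hgd)

theorem pvOtherWin_iff (state : List (List String)) (ai : String) :
    pvOtherWin state ai = true ↔
      ∃ r < 5, ∃ c < 5, pvCell state r c ≠ ai ∧ pvHasWin state (pvCell state r c) = true := by
  simp [pvOtherWin, List.any_eq_true, List.mem_range]

theorem pvFirst_eq (state : List (List String)) {g : List (Nat × Nat)} {q : String}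
    (hg : g ∈ pvPatterns) (hc : pvCompleted state g q = true) : pvFirst state g = q := by
  have hh := pvPatterns_head g hg
  have := List.all_eq_true.mp hc _ hh
  simpa [pvFirst] using this

theorem pvGood_of (state : List (List String)) {g : List (Nat × Nat)} {q : String}
    (hg : g ∈ pvPatterns) (hq : q ≠ " ") (hc : pvCompleted state g q = true) :
    pvGood state g = true := by
  have hf := pvFirst_eq state hg hc
  simp only [pvGood, hf]
  simp [hq, hc]

theorem pvHasWin_of_good (state : List (List String)) {g : List (Nat × Nat)}
    (hg : g ∈ pvPatterns) (h : pvGood state g = true) :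
    pvHasWin state (pvFirst state g) = true := by
  rw [pvGood, Bool.and_eq_true] at h
  rw [pvHasWin, Bool.and_eq_true]
  exact ⟨h.1, List.any_eq_true.mpr ⟨g, hg, h.2⟩⟩

theorem pvFirst_cell (state : List (List String)) {g : List (Nat × Nat)}
    (hg : g ∈ pvPatterns) : ∃ r < 5, ∃ c < 5, pvFirst state g = pvCell state r c := by
  have hh := pvPatterns_head g hg
  have hb := pvPatterns_bounds g hg _ hh
  exact ⟨_, hb.1, _, hb.2, rfl⟩

theorem pvValues_mem (state : List (List String)) (p : String) :
    p ∈ ((List.range 5).flatMap (fun r => (List.range 5).map (fun c => pvCell state r c))) ↔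
      ∃ r < 5, ∃ c < 5, p = pvCell state r c := by
  simp [List.mem_flatMap, List.mem_map, List.mem_range, eq_comm]

theorem pvOthersAny_iff (state : List (List String)) (ai : String) :
    ((pvOthers state ai).any (fun p => pvWinsB state p) = true) ↔ pvOtherWin state ai = true := by
  constructor
  · intro h
    obtain ⟨p, hp, hw⟩ := List.any_eq_true.mp h
    rw [pvOthers] at hp
    have hp' := (PySem.Set.mem_diff _ _ _).mp hp
    have hpv := (pvValues_mem state p).mp ((PySem.Set.mem_ofList _ _).mp hp'.1)
    have hpn : p ≠ " " ∧ p ≠ ai := by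
      have := hp'.2
      simp [PySem.Set.mem_ofList] at this
      exact this
    obtain ⟨r, hr, c, hc, rfl⟩ := hpv
    refine (pvOtherWin_iff state ai).mpr ⟨r, hr, c, hc, hpn.2, ?_⟩
    rw [pvHasWin, Bool.and_eq_true]
    obtain ⟨g, hg, hcomp⟩ := (pvWinsB_iff state _).mp hw
    exact ⟨by simpa using hpn.1, List.any_eq_true.mpr ⟨g, hg, hcomp⟩⟩
  · intro h
    obtain ⟨r, hr, c, hc, hne, hwin⟩ := (pvOtherWin_iff state ai).mp h
    rw [pvHasWin, Bool.and_eq_true] at hwin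
    obtain ⟨g, hg, hcomp⟩ := List.any_eq_true.mp hwin.2
    refine List.any_eq_true.mpr ⟨pvCell state r c, ?_, (pvWinsB_iff state _).mpr ⟨g, hg, hcomp⟩⟩
    rw [pvOthers]
    refine (PySem.Set.mem_diff _ _ _).mpr ⟨(PySem.Set.mem_ofList _ _).mpr
      ((pvValues_mem state _).mpr ⟨r, hr, c, hc, rfl⟩), ?_⟩
    simp [PySem.Set.mem_ofList]
    exact ⟨by simpa using hwin.1, hne⟩

-- the T scan equals B's geometric verdict under the no-conflict precondition
theorem pvScan_eq_B (state : List (List String)) (ai : String)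
    (hnc : ¬(pvHasWin state ai = true ∧ pvOtherWin state ai = true)) :
    pvScanT state ai pvPatterns =
      (if ai != " " && pvWinsB state ai then 1
       else if (pvOthers state ai).any (fun p => pvWinsB state p) then -1 else 0) := by
  by_cases hH : pvHasWin state ai = true
  · have hOW : pvOtherWin state ai ≠ true := fun h => hnc ⟨hH, h⟩
    rw [pvHasWin, Bool.and_eq_true] at hH
    obtain ⟨g0, hg0, hcomp0⟩ := List.any_eq_true.mp hH.2
    have hw : pvWinsB state ai = true := (pvWinsB_iff state ai).mpr ⟨g0, hg0, hcomp0⟩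
    have hcond : (ai != " " && pvWinsB state ai) = true := by simp [hH.1, hw]
    rw [if_pos hcond]
    refine pvScanT_one state ai pvPatterns ⟨g0, hg0, pvGood_of state hg0 (by simpa using hH.1) hcomp0⟩ ?_
    intro g hg hgood
    by_contra hne
    obtain ⟨r, hr, c, hc, heq⟩ := pvFirst_cell state hg
    refine hOW ((pvOtherWin_iff state ai).mpr ⟨r, hr, c, hc, heq ▸ hne, heq ▸ pvHasWin_of_good state hg hgood⟩)
  · have hHf : pvHasWin state ai ≠ true := hH
    have hwai : ∀ hsp : ai ≠ " ", pvWinsB state ai ≠ true := by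
      intro hsp hw
      obtain ⟨g, hg, hcomp⟩ := (pvWinsB_iff state ai).mp hw
      refine hHf ?_
      rw [pvHasWin, Bool.and_eq_true]
      exact ⟨by simpa using hsp, List.any_eq_true.mpr ⟨g, hg, hcomp⟩⟩
    have hcond : (ai != " " && pvWinsB state ai) = false := by
      by_cases hsp : ai = " "
      · simp [hsp]
      · cases hwb : pvWinsB state ai
        · simp
        · exact absurd hwb (hwai hsp)
    by_cases hA : (pvOthers state ai).any (fun p => pvWinsB state p) = true
    · have hOW := (pvOthersAny_iff state ai).mp hA
      rw [hcond, hA]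
      simp only [Bool.false_eq_true, if_false, if_pos]
      obtain ⟨r, hr, c, hc, hne, hwin⟩ := (pvOtherWin_iff state ai).mp hOW
      have hwin' := hwin
      rw [pvHasWin, Bool.and_eq_true] at hwin'
      obtain ⟨g, hg, hcomp⟩ := List.any_eq_true.mp hwin'.2
      refine pvScanT_neg state ai pvPatterns
        ⟨g, hg, pvGood_of state hg (by simpa using hwin'.1) hcomp⟩ ?_
      intro g' hg' hgood' hfeq
      exact hHf (hfeq ▸ pvHasWin_of_good state hg' hgood')
    · have hAf : ((pvOthers state ai).any (fun p => pvWinsB state p)) = false :=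
        Bool.not_eq_true _ ▸ (by simpa using hA)
      rw [hcond, hAf]
      simp only [Bool.false_eq_true, if_false]
      refine pvScanT_zero state ai pvPatterns ?_
      intro g hg
      cases hgd : pvGood state g
      · rfl
      · exfalso
        by_cases hfeq : pvFirst state g = ai
        · exact hHf (hfeq ▸ pvHasWin_of_good state hg hgd)
        · obtain ⟨r, hr, c, hc, heq⟩ := pvFirst_cell state hg
          exact hA ((pvOthersAny_iff state ai).mpr ((pvOtherWin_iff state ai).mpr
            ⟨r, hr, c, hc, heq ▸ hfeq, heq ▸ pvHasWin_of_good state hg hgd⟩))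

-- ===== VERDICT (by name: the statement is the Claim_ definition above) =====
theorem game_value_spec : Claim_equal_game_value := by
  intro state ai hdom hpre
  obtain ⟨h5, hrows, hnc⟩ := hpre
  unfold Spec_game_value game_value_alt
  rw [pvAT state ai h5 hrows, pvCount_eq state ai h5 hrows, pvScan_eq_B state ai hnc]
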